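-- pv_equiv track=rewrite | github.com/Bitxogm/Roman_Calculator | outer_lib/f_romanos.py | to_groups
-- ===== SOURCE A (Python) =====
-- def to_groups(number: int) -> list:
--     result = []
--
--     while number > 0:
--         resto = number % 1000
--         result.append(resto)
--         number = number // 1000
--
--     if not result:
--         result = [0]
--     elif result[-1] < 4 and len(result) > 1:
--         result[-2] = result[-1] * 1000 + result[-2]
--         result.pop()
--
--     return result[::-1]
-- ===== SOURCE B (Python) =====
-- def to_groups(number: int) -> list:
--     if number <= 0:
--         return [0]
--
--     def rec(n):
--         # most-significant-first base-1000 digits of n (n > 0), no reversal needed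
--         if n < 1000:
--             return [n]
--         return rec(n // 1000) + [n % 1000]
--
--     groups = rec(number)
--     if len(groups) > 1 and groups[0] < 4:
--         groups[:2] = [groups[0] * 1000 + groups[1]]
--     return groups
-- ===== Notes on version B (the rewrite author's own statement) =====
-- stated objective: alternative
-- what changed: Replaces the while-loop that appends least-significant groups and then reverses (with a tail-end merge through negative indices, in-place assignment and pop) by a structural recursion that yields the groups most-significant-first directly, with the <4 merge done by a plain head pattern.
import Mathlib
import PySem

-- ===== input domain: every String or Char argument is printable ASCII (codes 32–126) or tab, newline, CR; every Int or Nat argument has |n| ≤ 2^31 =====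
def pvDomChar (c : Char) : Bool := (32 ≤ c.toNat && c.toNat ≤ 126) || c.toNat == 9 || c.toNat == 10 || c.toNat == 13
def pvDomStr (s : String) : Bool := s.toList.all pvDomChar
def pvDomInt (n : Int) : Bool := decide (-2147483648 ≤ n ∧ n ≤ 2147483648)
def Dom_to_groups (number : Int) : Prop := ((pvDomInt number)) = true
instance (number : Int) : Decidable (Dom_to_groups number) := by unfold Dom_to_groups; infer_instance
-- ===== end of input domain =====

-- B replaces the append-then-reverse while loop (with its negative-index tail merge and pop)
-- by a structural recursion producing the base-1000 groups most-significant-first; alternative decomposition, same cost.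

-- ===== PORT A =====
-- the while loop: appends number % 1000, floor-divides by 1000
def toGroupsLoopA (number : Int) (result : List Int) : List Int :=
  if number > 0 then
    toGroupsLoopA (PySem.Int.floordiv number 1000) (result ++ [PySem.Int.mod number 1000])
  else result
termination_by number.toNat
decreasing_by
  have h1000 : (0:Int) < 1000 := by norm_num
  have := PySem.Int.floordiv_eq_ediv_of_pos (a := number) h1000
  rw [this]
  have h : 0 < number := by omega
  have h2 : number / 1000 < number := by
    rw [Int.ediv_lt_iff_lt_mul (by norm_num)]; nlinarith
  have h3 : 0 ≤ number / 1000 := Int.ediv_nonneg (le_of_lt h) (by norm_num)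
  omega

def to_groups (number : Int) : List Int :=
  let result := toGroupsLoopA number []
  let result :=
    if result = [] then [0]
    else if (PySem.List.pyGet? result (-1)).getD 0 < 4 ∧ result.length > 1 then
      -- result[-2] = result[-1] * 1000 + result[-2]; result.pop()
      -- (assignment at index -2 = set at length-2, exact since length > 1; pop() drops the last element)
      ((result.set (result.length - 2)
          ((PySem.List.pyGet? result (-1)).getD 0 * 1000 + (PySem.List.pyGet? result (-2)).getD 0)).dropLast)
    else result
  result.reverse  -- result[::-1]

-- ===== PORT B =====
-- rec: most-significant-first base-1000 digits of n (n > 0)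
def toGroupsRecB (n : Int) : List Int :=
  if n < 1000 then [n]
  else toGroupsRecB (PySem.Int.floordiv n 1000) ++ [PySem.Int.mod n 1000]
termination_by n.toNat
decreasing_by
  have h1000 : (0:Int) < 1000 := by norm_num
  have := PySem.Int.floordiv_eq_ediv_of_pos (a := n) h1000
  rw [this]
  have h2 : n / 1000 < n := by
    rw [Int.ediv_lt_iff_lt_mul (by norm_num)]; nlinarith
  have h3 : 0 ≤ n / 1000 := Int.ediv_nonneg (by omega) (by norm_num)
  omega

def to_groups_alt (number : Int) : List Int :=
  if number ≤ 0 then [0]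
  else
    let groups := toGroupsRecB number
    -- if len(groups) > 1 and groups[0] < 4: groups[:2] = [groups[0]*1000 + groups[1]]
    match groups with
    | g0 :: g1 :: rest => if g0 < 4 then (g0 * 1000 + g1) :: rest else g0 :: g1 :: rest
    | gs => gs

-- ===== PRECONDITION & SPEC =====
def Spec_to_groups (number : Int) (out : List Int) : Prop := out = to_groups_alt number
instance (number : Int) (out : List Int) : Decidable (Spec_to_groups number out) := by unfold Spec_to_groups; infer_instance

-- ===== CLAIM (what is proved, stated in full; the proofs are below) =====
def Claim_equal_to_groups : Prop := ∀ (number : Int), Dom_to_groups number → Spec_to_groups number (to_groups number)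

-- ===== LEMMAS AND PROOFS =====

-- A's loop accumulates exactly the reverse of B's recursion
theorem loopA_eq_rec (n : Int) :
    ∀ (acc : List Int), 0 < n → toGroupsLoopA n acc = acc ++ (toGroupsRecB n).reverse := by
  induction n using toGroupsRecB.induct with
  | case1 m hm =>
    intro acc hn
    have hdiv : PySem.Int.floordiv m 1000 = 0 := by
      rw [PySem.Int.floordiv_eq_ediv_of_pos (by norm_num)]
      omega
    have hmod : PySem.Int.mod m 1000 = m := by
      rw [PySem.Int.mod_eq_emod_of_pos (by norm_num)]; omega
    rw [toGroupsLoopA]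
    simp only [hn, hdiv]
    rw [toGroupsLoopA]
    rw [toGroupsRecB]
    simp [hm]
    omega
  | case2 m hm ih =>
    intro acc hn
    have hq : 0 < PySem.Int.floordiv m 1000 := by
      rw [PySem.Int.floordiv_eq_ediv_of_pos (by norm_num)]
      have := Int.le_ediv_iff_mul_le (a := 1) (b := m) (c := (1000:Int)) (by norm_num)
      omega
    rw [toGroupsLoopA]
    simp only [hn]
    rw [ih _ hq]
    conv_rhs => rw [toGroupsRecB]
    simp [hm]

theorem setAppend2 (l : List Int) (a b v : Int) :
    (l ++ [a, b]).set ((l ++ [a, b]).length - 2) v = l ++ [v, b] := by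
  have hlen : (l ++ [a, b]).length - 2 = l.length := by simp
  rw [hlen]
  induction l with
  | nil => rfl
  | cons x xs ih => simp [ih]

theorem pyGetNeg1 (l : List Int) (x : Int) :
    PySem.List.pyGet? (l ++ [x]) (-1) = some x := by
  simp [PySem.List.pyGet?, PySem.List.pyIdx?]

theorem pyGetNeg2 (l : List Int) (a b : Int) :
    PySem.List.pyGet? (l ++ [a, b]) (-2) = some a := by
  have : l ++ [a, b] = (l ++ [a]) ++ [b] := by simp
  rw [this]
  simp [PySem.List.pyGet?, PySem.List.pyIdx?]

-- ===== VERDICT (by name: the statement is the Claim_ definition above) =====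
theorem to_groups_spec : Claim_equal_to_groups := by
  intro number _
  unfold Spec_to_groups to_groups to_groups_alt
  by_cases hpos : 0 < number
  · have hloop := loopA_eq_rec number [] hpos
    simp only [List.nil_append] at hloop
    simp only [hloop, if_neg (by omega : ¬ number ≤ 0)]
    rcases hrec : toGroupsRecB number with _ | ⟨g0, gs⟩
    · -- rec never returns []
      exfalso
      have : (toGroupsRecB number).length ≠ 0 := by
        rw [toGroupsRecB]; split <;> simp
      simp [hrec] at this
    · rcases gs with _ | ⟨g1, rest⟩
      · simp
      · -- (g0 :: g1 :: rest).reverse = rest.reverse ++ [g1, g0]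
        have hrev : (g0 :: g1 :: rest).reverse = rest.reverse ++ [g1, g0] := by simp
        rw [hrev]
        have hg1 : rest.reverse ++ [g1, g0] = (rest.reverse ++ [g1]) ++ [g0] := by simp
        have hget1 : PySem.List.pyGet? (rest.reverse ++ [g1, g0]) (-1) = some g0 := by
          rw [hg1]; exact pyGetNeg1 _ _
        have hget2 : PySem.List.pyGet? (rest.reverse ++ [g1, g0]) (-2) = some g1 :=
          pyGetNeg2 _ _ _
        simp only [hget1, hget2, Option.getD_some]
        rw [setAppend2]
        by_cases h4 : g0 < 4
        · simp [h4]
        · simp [h4]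
  · -- number ≤ 0: A's loop exits immediately, result = [] → [0]
    rw [toGroupsLoopA]
    simp [hpos, if_pos (by omega : number ≤ 0)]
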